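-- pv_equiv track=rewrite | github.com/BenoitDervieux/BachelorComputerSciences | 1st year/Computer Security/Assignment 1/Task3_ass1_CS.py | transposition_decoding
-- ===== SOURCE A (Python) =====
-- def transposition_decoding(sentence, grid_horizontal,
--                            grid_vertical, swap_number):
--
--     unswap_string = ''
--     for i in range(len(sentence)):
--         unswap_string += sentence[(i - swap_number) % len(sentence)]
--         # Unswap the beginning of the string
--
--     iteration = 0
--     list_to_transpose = [[0 for q in range(grid_vertical)]
--                          for p in range(grid_horizontal)]
--     # Create a two dimension list
--     for i in range(grid_horizontal):
--         for j in range(grid_vertical):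
--             # Add the charcters inside it
--             list_to_transpose[i][j] = unswap_string[iteration]
--             iteration += 1
--
--     string_to_return = ''
--     for j in range(grid_vertical):
--         for i in range(grid_horizontal):
--             # Place the untranspose character
--             # In a string
--             string_to_return += list_to_transpose[i][j]
--
--     return string_to_return
-- ===== SOURCE B (Python) =====
-- def transposition_decoding(sentence, grid_horizontal,
--                            grid_vertical, swap_number):
--     n = len(sentence)
--     if n:
--         k = (-swap_number) % n
--         unswap = sentence[k:] + sentence[:k]
--     else:
--         unswap = ''
--     return ''.join(unswap[i * grid_vertical + j]
--                    for j in range(grid_vertical)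
--                    for i in range(grid_horizontal))
-- ===== Notes on version B (the rewrite author's own statement) =====
-- stated objective: simpler
-- what changed: B rotates the string with one slice concatenation instead of a character-by-character modular loop, and drops the intermediate 2-D grid entirely, reading the output directly at index i*grid_vertical+j in column-major order.
import Mathlib
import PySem

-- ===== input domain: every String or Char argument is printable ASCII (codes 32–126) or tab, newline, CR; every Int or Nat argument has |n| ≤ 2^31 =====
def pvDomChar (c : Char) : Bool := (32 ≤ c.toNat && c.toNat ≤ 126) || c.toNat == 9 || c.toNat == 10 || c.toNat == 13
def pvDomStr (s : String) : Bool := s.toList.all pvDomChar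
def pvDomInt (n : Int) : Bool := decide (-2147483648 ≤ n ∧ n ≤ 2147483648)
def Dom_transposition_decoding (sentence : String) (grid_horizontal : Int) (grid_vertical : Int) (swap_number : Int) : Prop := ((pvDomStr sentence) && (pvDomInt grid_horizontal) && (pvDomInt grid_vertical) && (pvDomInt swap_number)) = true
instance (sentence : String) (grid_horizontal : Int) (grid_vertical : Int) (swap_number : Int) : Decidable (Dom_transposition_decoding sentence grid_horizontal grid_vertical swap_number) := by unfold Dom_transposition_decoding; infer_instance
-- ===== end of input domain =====

-- B replaces A's character-by-character modular rotation loop by one slice concatenation and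
-- drops A's intermediate 2-D grid, reading each output character directly at index i*gv+j (simpler).

-- ===== PORT A =====
-- literal port of A; the grid's Python `0` placeholder is typed as ' ' here (never read on admitted
-- inputs), and Python's raising list indexing/assignment is pyGetD/pySetD (exact under Pre_).
def transposition_decoding (sentence : String) (grid_horizontal : Int) (grid_vertical : Int) (swap_number : Int) : String :=
  let cs := sentence.toList
  let n : Int := (cs.length : Int)
  let unswap : List Char := (PySem.List.pyRange 0 n 1).foldl
      (fun acc i => acc ++ [PySem.List.pyGetD cs (PySem.Int.mod (i - swap_number) n) ' ']) []
  let grid0 : List (List Char) := (PySem.List.pyRange 0 grid_horizontal 1).map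
      (fun _ => (PySem.List.pyRange 0 grid_vertical 1).map (fun _ => ' '))
  let st : List (List Char) × Int := (PySem.List.pyRange 0 grid_horizontal 1).foldl
      (fun st i => (PySem.List.pyRange 0 grid_vertical 1).foldl
        (fun (st : List (List Char) × Int) j =>
          (PySem.List.pySetD st.1 i
             (PySem.List.pySetD (PySem.List.pyGetD st.1 i []) j
                (PySem.List.pyGetD unswap st.2 ' ')), st.2 + 1))
        st) (grid0, 0)
  let out : List Char := (PySem.List.pyRange 0 grid_vertical 1).foldl
      (fun acc j => (PySem.List.pyRange 0 grid_horizontal 1).foldl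
        (fun acc i => acc ++ [PySem.List.pyGetD (PySem.List.pyGetD st.1 i []) j ' ']) acc) []
  String.ofList out

-- ===== PORT B =====
def transposition_decoding_alt (sentence : String) (grid_horizontal : Int) (grid_vertical : Int) (swap_number : Int) : String :=
  let cs := sentence.toList
  let n : Int := (cs.length : Int)
  let unswap : List Char :=
    if n = 0 then []
    else
      let k := PySem.Int.mod (-swap_number) n
      PySem.List.slice cs (some k) none ++ PySem.List.slice cs none (some k)
  String.ofList ((PySem.List.pyRange 0 grid_vertical 1).flatMap (fun j =>
    (PySem.List.pyRange 0 grid_horizontal 1).map (fun i =>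
      PySem.List.pyGetD unswap (i * grid_vertical + j) ' ')))

-- ===== PRECONDITION & SPEC =====
-- Pre_ excludes exactly the inputs where A raises IndexError: a positive grid larger than the sentence.
def Pre_transposition_decoding (sentence : String) (grid_horizontal : Int) (grid_vertical : Int) (swap_number : Int) : Prop :=
  0 < grid_horizontal → 0 < grid_vertical → grid_horizontal * grid_vertical ≤ PySem.Str.len sentence
instance (sentence : String) (grid_horizontal : Int) (grid_vertical : Int) (swap_number : Int) : Decidable (Pre_transposition_decoding sentence grid_horizontal grid_vertical swap_number) := by unfold Pre_transposition_decoding; infer_instance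
def pvWitness_transposition_decoding : String × Int × Int × Int := ("abcdef", 2, 3, 1)

def Spec_transposition_decoding (sentence : String) (grid_horizontal : Int) (grid_vertical : Int) (swap_number : Int) (out : String) : Prop := out = transposition_decoding_alt sentence grid_horizontal grid_vertical swap_number
instance (sentence : String) (grid_horizontal : Int) (grid_vertical : Int) (swap_number : Int) (out : String) : Decidable (Spec_transposition_decoding sentence grid_horizontal grid_vertical swap_number out) := by unfold Spec_transposition_decoding; infer_instance

-- ===== CLAIM (what is proved, stated in full; the proofs are below) =====
def Claim_equal_transposition_decoding : Prop := ∀ (sentence : String) (grid_horizontal : Int) (grid_vertical : Int) (swap_number : Int), Dom_transposition_decoding sentence grid_horizontal grid_vertical swap_number → Pre_transposition_decoding sentence grid_horizontal grid_vertical swap_number → Spec_transposition_decoding sentence grid_horizontal grid_vertical swap_number (transposition_decoding sentence grid_horizontal grid_vertical swap_number)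

-- ===== LEMMAS AND PROOFS =====

-- L2: filling always row iN reduces to a fold on that row
theorem grid_fold_row (u : List Char) (js : List Int) :
    ∀ (g : List (List Char)) (iN : Nat) (_ : iN < g.length) (c : Int),
    js.foldl (fun (st : List (List Char) × Int) j =>
        (PySem.List.pySetD st.1 (iN : Int)
          (PySem.List.pySetD (PySem.List.pyGetD st.1 (iN : Int) []) j
            (PySem.List.pyGetD u st.2 ' ')), st.2 + 1)) (g, c)
    = (g.set iN (js.foldl (fun (s : List Char × Int) j =>
          (PySem.List.pySetD s.1 j (PySem.List.pyGetD u s.2 ' '), s.2 + 1)) (g[iN], c)).1,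
       (js.foldl (fun (s : List Char × Int) j =>
          (PySem.List.pySetD s.1 j (PySem.List.pyGetD u s.2 ' '), s.2 + 1)) (g[iN], c)).2) := by
  induction js with
  | nil => intro g iN hi c; simp
  | cons j js ih =>
    intro g iN hi c
    simp only [List.foldl_cons]
    rw [show (PySem.List.pySetD g (iN : Int)
          (PySem.List.pySetD (PySem.List.pyGetD g (iN : Int) []) j (PySem.List.pyGetD u c ' ')))
        = g.set iN (PySem.List.pySetD (g.getD iN []) j (PySem.List.pyGetD u c ' ')) by
      simp [PySem.List.pySetD_natCast, PySem.List.pyGetD_natCast]]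
    rw [ih (g.set iN _) iN (by simpa using hi) (c + 1)]
    rw [List.getElem_set_self, List.set_set]
    congr 2 <;> rw [List.getD_eq_getElem _ _ hi]

theorem row_fold_closed (u : List Char) (m : Nat) :
    ∀ (r : List Char) (c : Int), m ≤ r.length →
    (PySem.List.pyRange 0 (m : Int) 1).foldl (fun (s : List Char × Int) j =>
        (PySem.List.pySetD s.1 j (PySem.List.pyGetD u s.2 ' '), s.2 + 1)) (r, c)
    = ((List.range m).map (fun j : Nat => PySem.List.pyGetD u (c + (j : Int)) ' ') ++ r.drop m, c + m) := by
  induction m with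
  | zero => intro r c _; simp [PySem.List.pyRange_one_eq_nil]
  | succ m ih =>
    intro r c hm
    rw [show ((m + 1 : Nat) : Int) = (m : Int) + 1 by push_cast; ring]
    rw [PySem.List.pyRange_one_succ_right (by positivity), List.foldl_append]
    rw [ih r c (by omega)]
    simp only [List.foldl_cons, List.foldl_nil]
    have hml : ((List.range m).map (fun j : Nat => PySem.List.pyGetD u (c + (j : Int)) ' ')).length = m := by simp
    simp only [Prod.mk.injEq]
    refine ⟨?_, by ring⟩
    rw [PySem.List.pySetD_natCast]
    rw [List.set_append_right _ _ (by omega)]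
    rw [hml, Nat.sub_self]
    rw [List.drop_eq_getElem_cons (by omega), List.set_cons_zero]
    rw [List.range_succ, List.map_append]
    simp

theorem set_map_range {α : Type} (f : Nat → α) (nn m : Nat) (v : α) :
    ((List.range nn).map f).set m v = (List.range nn).map (fun i => if i = m then v else f i) := by
  apply List.ext_getElem
  · simp
  · intro i hi hi2
    simp only [List.getElem_set, List.getElem_map, List.getElem_range]
    by_cases h : i = m
    · subst h; simp
    · rw [if_neg (fun hh => h hh.symm), if_neg h]

theorem outer_fold_closed (u : List Char) (gvN ghN : Nat) (m : Nat) (hm : m ≤ ghN) :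
    (PySem.List.pyRange 0 (m : Int) 1).foldl
      (fun (st : List (List Char) × Int) i => (PySem.List.pyRange 0 (gvN : Int) 1).foldl
        (fun (st : List (List Char) × Int) j =>
          (PySem.List.pySetD st.1 i
            (PySem.List.pySetD (PySem.List.pyGetD st.1 i []) j
              (PySem.List.pyGetD u st.2 ' ')), st.2 + 1)) st)
      ((List.range ghN).map (fun _ => (List.range gvN).map (fun _ => ' ')), 0)
    = ((List.range ghN).map (fun i =>
         if i < m then (List.range gvN).map (fun j : Nat => PySem.List.pyGetD u ((i : Int) * (gvN : Int) + (j : Int)) ' ')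
         else (List.range gvN).map (fun _ => ' ')),
       (m : Int) * (gvN : Int)) := by
  induction m with
  | zero => simp [PySem.List.pyRange_one_eq_nil]
  | succ m ih =>
    rw [show ((m + 1 : Nat) : Int) = (m : Int) + 1 by push_cast; ring]
    rw [PySem.List.pyRange_one_succ_right (by positivity), List.foldl_append]
    rw [ih (by omega)]
    simp only [List.foldl_cons, List.foldl_nil]
    have hlen : ((List.range ghN).map (fun i =>
         if i < m then (List.range gvN).map (fun j : Nat => PySem.List.pyGetD u ((i : Int) * (gvN : Int) + (j : Int)) ' ')
         else (List.range gvN).map (fun _ => ' '))).length = ghN := by simp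
    rw [grid_fold_row u _ _ m (by omega : m < _) _]
    have hgm : ((List.range ghN).map (fun i =>
         if i < m then (List.range gvN).map (fun j : Nat => PySem.List.pyGetD u ((i : Int) * (gvN : Int) + (j : Int)) ' ')
         else (List.range gvN).map (fun _ => ' ')))[m]'(by omega) = (List.range gvN).map (fun _ => ' ') := by
      simp
    rw [hgm]
    rw [row_fold_closed u gvN _ _ (by simp)]
    simp only [Prod.mk.injEq]
    refine ⟨?_, by ring⟩
    rw [List.drop_of_length_le (by simp), List.append_nil]
    rw [set_map_range]
    apply List.map_congr_left
    intro i hi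
    rw [List.mem_range] at hi
    by_cases h1 : i = m
    · subst h1; rw [if_pos rfl, if_pos (by omega)]
    · rw [if_neg h1]
      by_cases h2 : i < m
      · rw [if_pos h2, if_pos (by omega)]
      · rw [if_neg h2, if_neg (by omega)]

theorem pyRange_map_nat {α : Type} (f : Int → α) (m : Nat) :
    (PySem.List.pyRange 0 (m : Int) 1).map f = (List.range m).map (fun k : Nat => f (k : Int)) := by
  rw [PySem.List.pyRange_one, List.map_map]
  norm_num

theorem unswap_eq (cs : List Char) (sw : Int) (h : cs ≠ []) :
    (PySem.List.pyRange 0 (cs.length : Int) 1).foldl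
      (fun acc i => acc ++ [PySem.List.pyGetD cs (PySem.Int.mod (i - sw) (cs.length : Int)) ' ']) []
    = PySem.List.slice cs (some (PySem.Int.mod (-sw) (cs.length : Int))) none
      ++ PySem.List.slice cs none (some (PySem.Int.mod (-sw) (cs.length : Int))) := by
  have hn : 0 < cs.length := List.length_pos_iff.mpr h
  have hnI : (0 : Int) < (cs.length : Int) := by exact_mod_cast hn
  set k : Int := PySem.Int.mod (-sw) (cs.length : Int) with hk
  have hk0 : 0 ≤ k := PySem.Int.mod_nonneg _ hnI
  have hkn : k < (cs.length : Int) := PySem.Int.mod_lt _ hnI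
  rw [PySem.List.slice_from _ hk0, PySem.List.slice_to _ hk0]
  rw [← List.rotate_eq_drop_append_take (by omega)]
  rw [PySem.List.foldl_append_singleton_eq_map, List.nil_append, pyRange_map_nat]
  apply List.ext_getElem
  · simp
  · intro t ht ht2
    simp only [List.getElem_map, List.getElem_range] at *
    rw [List.getElem_rotate]
    rw [PySem.Int.mod_eq_emod_of_pos hnI]
    have he0 : 0 ≤ ((t : Int) - sw) % (cs.length : Int) := Int.emod_nonneg _ (by omega)
    have hen : ((t : Int) - sw) % (cs.length : Int) < (cs.length : Int) := Int.emod_lt_of_pos _ hnI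
    rw [PySem.List.pyGetD_eq_getElem _ _ he0 (by simpa using hen)]
    congr 1
    have hkcast : ((k.toNat : Nat) : Int) = k := Int.toNat_of_nonneg hk0
    have : (((t + k.toNat) % cs.length : Nat) : Int) = ((t : Int) - sw) % (cs.length : Int) := by
      push_cast [hkcast]
      rw [hk, PySem.Int.mod_eq_emod_of_pos hnI]
      rw [Int.add_emod, Int.emod_emod_of_dvd _ dvd_rfl, ← Int.add_emod, sub_eq_add_neg]
    omega

theorem A_eq_B (sentence : String) (gh gv sw : Int)
    (hpre : 0 < gh → 0 < gv → gh * gv ≤ (sentence.toList.length : Int)) :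
    transposition_decoding sentence gh gv sw = transposition_decoding_alt sentence gh gv sw := by
  simp only [transposition_decoding, transposition_decoding_alt]
  by_cases hgv : 0 < gv
  · by_cases hgh : 0 < gh
    · have hle : gh * gv ≤ (sentence.toList.length : Int) := hpre hgh hgv
      have hcs : sentence.toList ≠ [] := by
        intro hnil
        rw [hnil] at hle
        simp at hle
        nlinarith
      have hn0 : (sentence.toList.length : Int) ≠ 0 := by
        have := List.length_pos_iff.mpr hcs; omega
      have hghc : gh = ((gh.toNat : Nat) : Int) := (Int.toNat_of_nonneg (by omega)).symm
      have hgvc : gv = ((gv.toNat : Nat) : Int) := (Int.toNat_of_nonneg (by omega)).symm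
      rw [hghc, hgvc]
      rw [unswap_eq sentence.toList sw hcs]
      rw [if_neg hn0]
      rw [pyRange_map_nat (fun _ => (PySem.List.pyRange 0 ((gv.toNat : Nat) : Int) 1).map (fun _ => ' ')) gh.toNat]
      rw [pyRange_map_nat (fun _ => ' ') gv.toNat]
      rw [outer_fold_closed _ gv.toNat gh.toNat gh.toNat le_rfl]
      simp only [PySem.List.foldl_append_singleton_eq_map, PySem.List.foldl_append_eq_flatMap,
        List.nil_append]
      apply congrArg
      rw [List.flatMap_def, List.flatMap_def]
      apply congrArg
      apply List.map_congr_left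
      intro j hj
      rw [PySem.List.mem_pyRange_one] at hj
      apply List.map_congr_left
      intro i hi
      rw [PySem.List.mem_pyRange_one] at hi
      obtain ⟨iN, rfl⟩ := Int.eq_ofNat_of_zero_le hi.1
      obtain ⟨jN, rfl⟩ := Int.eq_ofNat_of_zero_le hj.1
      have hiN : iN < gh.toNat := by exact_mod_cast hi.2
      have hjN : jN < gv.toNat := by exact_mod_cast hj.2
      simp only [PySem.List.pyGetD_natCast]
      rw [PySem.List.getD_map_range _ _ _ _ hiN, if_pos hiN]
      rw [PySem.List.getD_map_range _ _ _ _ hjN]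
    · -- gh ≤ 0 : inner ranges empty, result "" on both sides
      rw [PySem.List.pyRange_one_eq_nil (a := 0) (b := gh) (by omega)]
      simp
  · rw [PySem.List.pyRange_one_eq_nil (a := 0) (b := gv) (by omega)]
    simp
    


-- ===== VERDICT (by name: the statement is the Claim_ definition above) =====
theorem transposition_decoding_spec : Claim_equal_transposition_decoding := by
  intro sentence gh gv sw _ hpre
  unfold Spec_transposition_decoding
  apply A_eq_B sentence gh gv sw
  intro h1 h2
  have := hpre h1 h2
  rwa [PySem.Str.len_eq] at this
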